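-- pv_equiv track=rewrite | github.com/skalingclouds/Multi-Agent-Custom-Automation-Engine-Solution-Accelerator | src/leadgen/utils/voice_personality.py | _format_operating_hours
-- ===== SOURCE A (Python) =====
-- from typing import Any, Dict, List, Optional
--
-- def _format_operating_hours(hours: Optional[Dict[str, str]]) -> str:
--     """Format operating hours for voice agent context.
--
--     Args:
--         hours: Dictionary mapping day names to hours.
--
--     Returns:
--         Formatted hours string for the prompt.
--     """
--     if not hours:
--         return "Operating hours are not specified. Offer to have someone call back with this information."
--
--     days_order = ["Monday", "Tuesday", "Wednesday", "Thursday", "Friday", "Saturday", "Sunday"]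
--     lines = []
--
--     for day in days_order:
--         if day in hours:
--             lines.append(f"- {day}: {hours[day]}")
--
--     # Handle any non-standard keys
--     for day, time in hours.items():
--         if day not in days_order:
--             lines.append(f"- {day}: {time}")
--
--     return "\n".join(lines) if lines else "Operating hours not available."
-- ===== SOURCE B (Python) =====
-- from typing import Dict, Optional
--
--
-- def _format_operating_hours(hours: Optional[Dict[str, str]]) -> str:
--     """Bucket the entries by day rank in a single pass, then emit the buckets in order."""
--     if not hours:
--         return "Operating hours are not specified. Offer to have someone call back with this information."
--
--     days_order = ["Monday", "Tuesday", "Wednesday", "Thursday", "Friday", "Saturday", "Sunday"]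
--     rank = {day: i for i, day in enumerate(days_order)}
--     buckets = [[] for _ in range(len(days_order) + 1)]
--
--     for day, time in hours.items():
--         buckets[rank.get(day, len(days_order))].append(f"- {day}: {time}")
--
--     return "\n".join(line for bucket in buckets for line in bucket)
-- ===== Notes on version B (the rewrite author's own statement) =====
-- stated objective: alternative
-- what changed: Replaces A's two-phase construction (a scan over the seven weekday names with a dict lookup each, then a second pass over the items filtering out standard days) by a single bucket-sort pass: one traversal of the items appends each formatted line to one of eight rank buckets (seven weekdays plus one shared extras bucket), and the concatenated buckets are joined.
import Mathlib
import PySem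

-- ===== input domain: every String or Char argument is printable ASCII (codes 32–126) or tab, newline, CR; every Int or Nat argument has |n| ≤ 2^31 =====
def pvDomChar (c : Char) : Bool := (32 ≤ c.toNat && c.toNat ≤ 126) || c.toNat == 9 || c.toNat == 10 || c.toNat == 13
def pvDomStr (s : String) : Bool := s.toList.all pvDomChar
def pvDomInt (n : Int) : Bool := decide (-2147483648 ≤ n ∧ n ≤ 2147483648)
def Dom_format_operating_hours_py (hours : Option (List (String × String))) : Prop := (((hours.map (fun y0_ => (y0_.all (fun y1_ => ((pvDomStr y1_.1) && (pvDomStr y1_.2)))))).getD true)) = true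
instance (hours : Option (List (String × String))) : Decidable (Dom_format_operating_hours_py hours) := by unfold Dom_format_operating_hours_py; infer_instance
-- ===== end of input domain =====

-- B replaces A's two-phase construction (a lookup per weekday name, then a filtering second
-- pass over the items) by a single bucket-sort pass over the items ('alternative'); return
-- values agree on association lists without duplicate keys.


-- ===== PORT A =====
def pvDaysOrder : List String :=
  ["Monday", "Tuesday", "Wednesday", "Thursday", "Friday", "Saturday", "Sunday"]

def pvNoHoursMsg : String :=
  "Operating hours are not specified. Offer to have someone call back with this information."

def format_operating_hours_py (hours : Option (List (String × String))) : String :=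
  match hours with
  | none => pvNoHoursMsg          -- 'if not hours' on None
  | some h =>
    if h = [] then pvNoHoursMsg   -- 'if not hours' on the empty dict
    else
      -- for day in days_order: if day in hours: lines.append(f"- {day}: {hours[day]}")
      let lines1 : List String :=
        pvDaysOrder.foldl (fun acc day =>
          match PySem.Dict.get? (PySem.Dict.mk h) day with
          | some t => acc ++ ["- " ++ day ++ ": " ++ t]
          | none => acc) []
      -- for day, time in hours.items(): if day not in days_order: lines.append(f"- {day}: {time}")
      let lines : List String :=
        h.foldl (fun acc p =>
          if p.1 ∈ pvDaysOrder then acc else acc ++ ["- " ++ p.1 ++ ": " ++ p.2]) lines1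
      if lines = [] then "Operating hours not available." else PySem.Str.join "\n" lines

-- ===== PORT B =====
def format_operating_hours_py_alt (hours : Option (List (String × String))) : String :=
  match hours with
  | none => pvNoHoursMsg
  | some h =>
    if h = [] then pvNoHoursMsg
    else
      -- rank = {day: i for i, day in enumerate(days_order)}
      let rank : PySem.Dict String Int :=
        (PySem.List.enumerate pvDaysOrder).foldl
          (fun d p => d.insert p.2 p.1) PySem.Dict.empty
      -- buckets = [[] for _ in range(len(days_order) + 1)]
      let buckets0 : List (List String) := List.replicate (pvDaysOrder.length + 1) []
      -- for day, time in hours.items(): buckets[rank.get(day, len(days_order))].append(f"- {day}: {time}")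
      -- the bucket index rank.get(day, 7) is one of 0..7, hence nonnegative: Int.toNat is exact here
      let buckets :=
        h.foldl (fun bs p =>
          bs.modify (rank.getD p.1 (pvDaysOrder.length : Int)).toNat
            (fun b => b ++ ["- " ++ p.1 ++ ": " ++ p.2])) buckets0
      -- "\n".join(line for bucket in buckets for line in bucket)
      PySem.Str.join "\n" buckets.flatten

-- ===== PRECONDITION & SPEC =====
-- Pre_ excludes association lists with duplicate keys: they do not arise from a Python dict
-- (A's parameter type), and first-match lookup vs item iteration makes their reading ambiguous.
def Pre_format_operating_hours_py (hours : Option (List (String × String))) : Prop :=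
  ((hours.getD []).map Prod.fst).Nodup
instance (hours : Option (List (String × String))) : Decidable (Pre_format_operating_hours_py hours) := by unfold Pre_format_operating_hours_py; infer_instance

def pvWitness_format_operating_hours_py : (Option (List (String × String))) :=
  some [("Gym", "24h"), ("Monday", "9am-5pm"), ("Sunday", "closed")]

def Spec_format_operating_hours_py (hours : Option (List (String × String))) (out : String) : Prop := out = format_operating_hours_py_alt hours
instance (hours : Option (List (String × String))) (out : String) : Decidable (Spec_format_operating_hours_py hours out) := by unfold Spec_format_operating_hours_py; infer_instance

-- ===== CLAIM (what is proved, stated in full; the proofs are below) =====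
def Claim_equal_format_operating_hours_py : Prop := ∀ (hours : Option (List (String × String))), Dom_format_operating_hours_py hours → Pre_format_operating_hours_py hours → Spec_format_operating_hours_py hours (format_operating_hours_py hours)

-- ===== LEMMAS AND PROOFS =====

-- the formatted line of one item, f"- {day}: {time}"
def pvLine (p : String × String) : String := "- " ++ p.1 ++ ": " ++ p.2

-- the bucket index B computes for a key: rank.get(day, 7), as a Nat
def pvRank (s : String) : Nat :=
  (((PySem.List.enumerate pvDaysOrder).foldl
      (fun d p => d.insert p.2 p.1) PySem.Dict.empty : PySem.Dict String Int).getD s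
      (pvDaysOrder.length : Int)).toNat

lemma pvRank_spec (s : String) :
    pvRank s =
      if s = "Monday" then 0 else if s = "Tuesday" then 1 else if s = "Wednesday" then 2
      else if s = "Thursday" then 3 else if s = "Friday" then 4 else if s = "Saturday" then 5
      else if s = "Sunday" then 6 else 7 := by
  unfold pvRank pvDaysOrder
  simp only [PySem.List.enumerate_cons, PySem.List.enumerate_nil, List.foldl_cons, List.foldl_nil,
    PySem.Dict.getD_insert, PySem.Dict.getD_empty]
  split_ifs <;> simp_all

lemma pvRank_eq_seven_iff (s : String) : pvRank s = 7 ↔ s ∉ pvDaysOrder := by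
  rw [pvRank_spec]
  split_ifs <;> simp_all [pvDaysOrder]

-- the bucket loop preserves the number of buckets
lemma pv_bucket_len (h : List (String × String)) (bs : List (List String)) :
    (h.foldl (fun bs p => bs.modify (pvRank p.1) (fun b => b ++ [pvLine p])) bs).length
      = bs.length := by
  induction h generalizing bs with
  | nil => rfl
  | cons p t ih => simp [List.foldl_cons, ih, List.length_modify]

-- bucket i ends up holding exactly the lines of the items of rank i, in item order
lemma pv_bucket_get (h : List (String × String)) (bs : List (List String))
    (hlen : bs.length = 8) (i : Nat) (hi : i < 8) :
    (h.foldl (fun bs p => bs.modify (pvRank p.1) (fun b => b ++ [pvLine p])) bs)[i]'(by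
        rw [pv_bucket_len, hlen]; exact hi) =
      bs[i]'(by omega) ++ (h.filter (fun p => pvRank p.1 == i)).map pvLine := by
  induction h generalizing bs with
  | nil => simp
  | cons p t ih =>
      simp only [List.foldl_cons]
      rw [ih (bs.modify (pvRank p.1) (fun b => b ++ [pvLine p])) (by simp [List.length_modify, hlen])]
      rw [List.getElem_modify]
      by_cases hc : pvRank p.1 = i
      · simp [hc, List.append_assoc]
      · simp [hc]

lemma pv_filter_nil_of_not_mem (h : List (String × String)) (day : String)
    (hnm : day ∉ h.map Prod.fst) : h.filter (fun p => p.1 == day) = [] := by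
  rw [List.filter_eq_nil_iff]
  intro p hp hbeq
  exact hnm (List.mem_map.mpr ⟨p, hp, (eq_of_beq hbeq).symm ▸ rfl⟩)

-- A's per-day lookup line is the day's filter of the items (keys Nodup)
lemma pv_lookup_filter (h : List (String × String)) (hn : (h.map Prod.fst).Nodup)
    (day : String) :
    (match PySem.Dict.get? (PySem.Dict.mk h) day with
      | some t => ["- " ++ day ++ ": " ++ t]
      | none => ([] : List String)) = (h.filter (fun p => p.1 == day)).map pvLine := by
  induction h with
  | nil => simp [PySem.Dict.get?]
  | cons p t ih =>
      rw [List.map_cons, List.nodup_cons] at hn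
      rw [PySem.Dict.get?_mk_cons, List.filter_cons]
      by_cases hc : p.1 = day
      · subst hc
        simp only [BEq.rfl]
        rw [pv_filter_nil_of_not_mem t p.1 hn.1]
        simp [pvLine]
      · have : (p.1 == day) = false := by simp [hc]
        simp only [this, Bool.false_eq_true, if_false]
        exact ih hn.2

lemma pv_flatten_eight {α : Type} (l : List (List α)) (hl : l.length = 8) :
    l.flatten = l[0]'(by omega) ++ (l[1]'(by omega) ++ (l[2]'(by omega) ++ (l[3]'(by omega) ++
      (l[4]'(by omega) ++ (l[5]'(by omega) ++ (l[6]'(by omega) ++ l[7]'(by omega))))))) := by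
  rcases l with _|⟨a,_|⟨b,_|⟨c,_|⟨d,_|⟨e,_|⟨f,_|⟨g,_|⟨k,rest⟩⟩⟩⟩⟩⟩⟩⟩
  all_goals (try (exfalso; revert hl; simp; done))
  obtain rfl : rest = [] := by simpa using hl
  simp

set_option maxHeartbeats 2000000 in
lemma pv_ports_agree (hours : Option (List (String × String)))
    (hpre : ((hours.getD []).map Prod.fst).Nodup) :
    format_operating_hours_py hours = format_operating_hours_py_alt hours := by
  cases hours with
  | none => rfl
  | some h =>
    by_cases hnil : h = []
    · subst hnil; rfl
    · have hn : (h.map Prod.fst).Nodup := by simpa using hpre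
      unfold format_operating_hours_py format_operating_hours_py_alt
      simp only [if_neg hnil]
      -- A's first loop produces, day by day, the per-day filters of the items
      have hA1 : pvDaysOrder.foldl (fun acc day =>
          match PySem.Dict.get? (PySem.Dict.mk h) day with
          | some t => acc ++ ["- " ++ day ++ ": " ++ t]
          | none => acc) [] =
          pvDaysOrder.flatMap (fun day => (h.filter (fun p => p.1 == day)).map pvLine) := by
        rw [PySem.List.foldl_congr_mem pvDaysOrder
          (fun acc day =>
            match PySem.Dict.get? (PySem.Dict.mk h) day with
            | some t => acc ++ ["- " ++ day ++ ": " ++ t]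
            | none => acc)
          (fun acc day => acc ++ (h.filter (fun p => p.1 == day)).map pvLine) []
          (by intro acc day _
              dsimp only
              rw [← pv_lookup_filter h hn day]
              cases PySem.Dict.get? (PySem.Dict.mk h) day <;> simp)]
        rw [PySem.List.foldl_append_eq_flatMap]
        simp
      rw [hA1]
      -- A's second loop appends the lines of the non-standard keys
      have hA2 : h.foldl (fun acc p =>
          if p.1 ∈ pvDaysOrder then acc else acc ++ ["- " ++ p.1 ++ ": " ++ p.2])
          (pvDaysOrder.flatMap (fun day => (h.filter (fun p => p.1 == day)).map pvLine)) =
          pvDaysOrder.flatMap (fun day => (h.filter (fun p => p.1 == day)).map pvLine) ++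
            (h.filter (fun p => decide (p.1 ∉ pvDaysOrder))).map pvLine := by
        rw [PySem.List.foldl_congr_mem h
          (fun acc p => if p.1 ∈ pvDaysOrder then acc else acc ++ ["- " ++ p.1 ++ ": " ++ p.2])
          (fun acc p => if p.1 ∉ pvDaysOrder then acc ++ [pvLine p] else acc) _
          (by intro acc p _
              dsimp only
              by_cases hp : p.1 ∈ pvDaysOrder <;> simp [hp, pvLine])]
        rw [PySem.List.foldl_append_ite]
      rw [hA2]
      -- A's line list is nonempty because h is: the head's line is in it
      have hne : pvDaysOrder.flatMap (fun day => (h.filter (fun p => p.1 == day)).map pvLine) ++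
          (h.filter (fun p => decide (p.1 ∉ pvDaysOrder))).map pvLine ≠ [] := by
        obtain ⟨p, hp⟩ := List.exists_mem_of_ne_nil h hnil
        apply List.ne_nil_of_mem (a := pvLine p)
        rw [List.mem_append]
        by_cases hd : p.1 ∈ pvDaysOrder
        · exact Or.inl (List.mem_flatMap.mpr ⟨p.1, hd,
            List.mem_map_of_mem (List.mem_filter.mpr ⟨hp, by simp⟩)⟩)
        · exact Or.inr (List.mem_map_of_mem (List.mem_filter.mpr ⟨hp, by simp [hd]⟩))
      rw [if_neg hne]
      -- B's bucket step, written through pvRank and pvLine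
      have hstep : (fun (bs : List (List String)) (p : String × String) =>
          bs.modify (((PySem.List.enumerate pvDaysOrder).foldl
              (fun d p => d.insert p.2 p.1) PySem.Dict.empty : PySem.Dict String Int).getD p.1
              (pvDaysOrder.length : Int)).toNat
            (fun b => b ++ ["- " ++ p.1 ++ ": " ++ p.2])) =
          (fun bs p => bs.modify (pvRank p.1) (fun b => b ++ [pvLine p])) := rfl
      rw [hstep]
      have hrep : List.replicate (pvDaysOrder.length + 1) ([] : List String)
          = List.replicate 8 [] := rfl
      rw [hrep]
      congr 1
      rw [pv_flatten_eight _ (by rw [pv_bucket_len]; simp)]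
      rw [pv_bucket_get h _ (by simp) 0 (by omega), pv_bucket_get h _ (by simp) 1 (by omega),
          pv_bucket_get h _ (by simp) 2 (by omega), pv_bucket_get h _ (by simp) 3 (by omega),
          pv_bucket_get h _ (by simp) 4 (by omega), pv_bucket_get h _ (by simp) 5 (by omega),
          pv_bucket_get h _ (by simp) 6 (by omega), pv_bucket_get h _ (by simp) 7 (by omega)]
      -- bucket 7 holds exactly the non-standard keys …
      have g7 : h.filter (fun p => pvRank p.1 == 7) =
          h.filter (fun p => decide (p.1 ∉ pvDaysOrder)) := by
        apply List.filter_congr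
        intro p _
        rw [Bool.eq_iff_iff]
        simp [pvRank_eq_seven_iff]
      -- … and bucket i < 7 exactly the items keyed by the i-th weekday
      have gi : ∀ (i : Nat) (d : String), (∀ s : String, pvRank s = i ↔ s = d) →
          h.filter (fun p => pvRank p.1 == i) = h.filter (fun p => p.1 == d) := by
        intro i d hiff
        apply List.filter_congr
        intro p _
        rw [Bool.eq_iff_iff]
        simp [hiff]
      rw [g7, gi 0 "Monday" (by intro s; rw [pvRank_spec]; split_ifs <;> simp_all),
          gi 1 "Tuesday" (by intro s; rw [pvRank_spec]; split_ifs <;> simp_all),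
          gi 2 "Wednesday" (by intro s; rw [pvRank_spec]; split_ifs <;> simp_all),
          gi 3 "Thursday" (by intro s; rw [pvRank_spec]; split_ifs <;> simp_all),
          gi 4 "Friday" (by intro s; rw [pvRank_spec]; split_ifs <;> simp_all),
          gi 5 "Saturday" (by intro s; rw [pvRank_spec]; split_ifs <;> simp_all),
          gi 6 "Sunday" (by intro s; rw [pvRank_spec]; split_ifs <;> simp_all)]
      simp [pvDaysOrder, List.append_assoc]

-- ===== VERDICT (by name: the statement is the Claim_ definition above) =====
theorem format_operating_hours_py_spec : Claim_equal_format_operating_hours_py := by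
  intro hours _ hpre
  unfold Pre_format_operating_hours_py at hpre
  unfold Spec_format_operating_hours_py
  exact pv_ports_agree hours hpre
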